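-- pv_equiv track=rewrite | github.com/AlbertoSierraLopez/DisenoAnalisisAlgoritmos | PracticaDivideVenceras/Karatsuba_v2.py | suma_polinomios
-- ===== SOURCE A (Python) =====
-- def suma_polinomios(polinomio_1, polinomio_2):
--     n_1 = len(polinomio_1) - 1
--     n_2 = len(polinomio_2) - 1
--     if n_1 < 0:
--         return polinomio_2
--     elif n_2 < 0:
--         return polinomio_1
--     else:
--         if n_1 > n_2:
--             return suma_polinomios(polinomio_1[0:n_1], polinomio_2) + [polinomio_1[n_1]]
--         elif n_2 > n_1:
--             return suma_polinomios(polinomio_1, polinomio_2[0:n_2]) + [polinomio_2[n_2]]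
--         else:
--             return suma_polinomios(polinomio_1[0:n_1], polinomio_2[0:n_2]) + [polinomio_1[n_1] + polinomio_2[n_2]]
-- ===== SOURCE B (Python) =====
-- def suma_polinomios(polinomio_1, polinomio_2):
--     n = min(len(polinomio_1), len(polinomio_2))
--     return [x + y for x, y in zip(polinomio_1, polinomio_2)] \
--         + polinomio_1[n:] + polinomio_2[n:]
-- ===== Notes on version B (the rewrite author's own statement) =====
-- stated objective: faster
-- what changed: Replaces A's back-to-front recursion with repeated list slicing (quadratic copying) by one linear zip pass over the aligned coefficients plus appending the longer list's tail.
import Mathlib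
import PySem

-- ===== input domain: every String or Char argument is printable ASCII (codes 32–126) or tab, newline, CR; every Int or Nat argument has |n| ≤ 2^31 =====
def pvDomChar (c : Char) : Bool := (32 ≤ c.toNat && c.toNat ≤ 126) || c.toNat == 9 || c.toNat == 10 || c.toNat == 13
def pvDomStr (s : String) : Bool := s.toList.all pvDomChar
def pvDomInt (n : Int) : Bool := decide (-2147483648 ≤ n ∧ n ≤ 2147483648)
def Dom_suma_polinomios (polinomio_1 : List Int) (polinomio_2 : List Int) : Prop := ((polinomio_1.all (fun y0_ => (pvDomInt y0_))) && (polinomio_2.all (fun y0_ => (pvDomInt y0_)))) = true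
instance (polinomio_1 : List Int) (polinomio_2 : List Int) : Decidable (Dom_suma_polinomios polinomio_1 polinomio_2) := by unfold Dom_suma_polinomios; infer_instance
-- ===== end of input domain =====

-- B replaces A's back-to-front recursion with repeated slicing (quadratic copying)
-- by a single linear zip pass over the aligned coefficients plus the longer tail (faster).


-- ===== PORT A =====
-- length of the slice polinomio[0:len-1], used only for termination of the port of A
lemma pvSliceLen (xs : List Int) :
    (PySem.List.slice xs (some 0) (some ((xs.length : Int) - 1))).length = xs.length - 1 := by
  cases xs with
  | nil => rfl
  | cons x xs =>
    have h : (((x :: xs).length : Int) - 1) = (((x :: xs).length - 1 : Nat) : Int) := by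
      simp
    rw [h, PySem.List.slice_zero_start, PySem.List.slice_to_natCast]
    simp

-- indices n_1/n_2 are len-1, always in range in the branches where they are read,
-- so pyGetD's default 0 is never used
def suma_polinomios (polinomio_1 : List Int) (polinomio_2 : List Int) : List Int :=
  let n_1 : Int := (polinomio_1.length : Int) - 1
  let n_2 : Int := (polinomio_2.length : Int) - 1
  if n_1 < 0 then polinomio_2
  else if n_2 < 0 then polinomio_1
  else if n_1 > n_2 then
    suma_polinomios (PySem.List.slice polinomio_1 (some 0) (some n_1)) polinomio_2
      ++ [PySem.List.pyGetD polinomio_1 n_1 0]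
  else if n_2 > n_1 then
    suma_polinomios polinomio_1 (PySem.List.slice polinomio_2 (some 0) (some n_2))
      ++ [PySem.List.pyGetD polinomio_2 n_2 0]
  else
    suma_polinomios (PySem.List.slice polinomio_1 (some 0) (some n_1))
                    (PySem.List.slice polinomio_2 (some 0) (some n_2))
      ++ [PySem.List.pyGetD polinomio_1 n_1 0 + PySem.List.pyGetD polinomio_2 n_2 0]
termination_by polinomio_1.length + polinomio_2.length
decreasing_by
  all_goals (simp only [pvSliceLen]; omega)

-- ===== PORT B =====
def suma_polinomios_alt (polinomio_1 : List Int) (polinomio_2 : List Int) : List Int :=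
  let n : Nat := min polinomio_1.length polinomio_2.length
  ((polinomio_1.zip polinomio_2).map (fun xy => xy.1 + xy.2))
    ++ PySem.List.slice polinomio_1 (some (n : Int)) none
    ++ PySem.List.slice polinomio_2 (some (n : Int)) none

-- ===== PRECONDITION & SPEC =====
def Spec_suma_polinomios (polinomio_1 : List Int) (polinomio_2 : List Int) (out : List Int) : Prop := out = suma_polinomios_alt polinomio_1 polinomio_2
instance (polinomio_1 : List Int) (polinomio_2 : List Int) (out : List Int) : Decidable (Spec_suma_polinomios polinomio_1 polinomio_2 out) := by unfold Spec_suma_polinomios; infer_instance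

-- ===== CLAIM (what is proved, stated in full; the proofs are below) =====
def Claim_equal_suma_polinomios : Prop := ∀ (polinomio_1 : List Int) (polinomio_2 : List Int), Dom_suma_polinomios polinomio_1 polinomio_2 → Spec_suma_polinomios polinomio_1 polinomio_2 (suma_polinomios polinomio_1 polinomio_2)

-- ===== LEMMAS AND PROOFS =====

-- reference function: coefficient-wise sum with the longer tail kept
def zipAdd : List Int → List Int → List Int
  | [], ys => ys
  | xs, [] => xs
  | x :: xs, y :: ys => (x + y) :: zipAdd xs ys

lemma zipAdd_nil_right (xs : List Int) : zipAdd xs [] = xs := by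
  cases xs <;> rfl

lemma alt_eq_zipAdd (xs ys : List Int) : suma_polinomios_alt xs ys = zipAdd xs ys := by
  induction xs generalizing ys with
  | nil =>
    simp [suma_polinomios_alt, zipAdd]
  | cons x xs ih =>
    cases ys with
    | nil => simp [suma_polinomios_alt, zipAdd]
    | cons y ys =>
      have h := ih ys
      simp only [suma_polinomios_alt, PySem.List.slice_from_natCast] at h ⊢
      simp [zipAdd, Nat.succ_min_succ, ← h]

lemma zipAdd_append_left (xs ys : List Int) (a : Int) (h : ys.length ≤ xs.length) :
    zipAdd (xs ++ [a]) ys = zipAdd xs ys ++ [a] := by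
  induction xs generalizing ys with
  | nil =>
    cases ys with
    | nil => rfl
    | cons y ys => simp at h
  | cons x xs ih =>
    cases ys with
    | nil => simp [zipAdd_nil_right, zipAdd]
    | cons y ys =>
      simp only [List.cons_append, zipAdd, List.length_cons] at *
      rw [ih ys (by omega)]

lemma zipAdd_append_right (xs ys : List Int) (b : Int) (h : xs.length ≤ ys.length) :
    zipAdd xs (ys ++ [b]) = zipAdd xs ys ++ [b] := by
  induction xs generalizing ys with
  | nil => rfl
  | cons x xs ih =>
    cases ys with
    | nil => simp at h
    | cons y ys =>
      simp only [List.cons_append, zipAdd, List.length_cons] at *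
      rw [ih ys (by omega)]

lemma zipAdd_append_both (xs ys : List Int) (a b : Int) (h : xs.length = ys.length) :
    zipAdd (xs ++ [a]) (ys ++ [b]) = zipAdd xs ys ++ [a + b] := by
  induction xs generalizing ys with
  | nil =>
    cases ys with
    | nil => rfl
    | cons y ys => simp at h
  | cons x xs ih =>
    cases ys with
    | nil => simp at h
    | cons y ys =>
      simp only [List.cons_append, zipAdd, List.length_cons] at *
      rw [ih ys (by omega)]

-- the slice polinomio[0:len-1] is dropLast, and the pyGetD at len-1 is getLast
lemma slice_pred (xs : List Int) (h : 1 ≤ xs.length) :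
    PySem.List.slice xs (some 0) (some ((xs.length : Int) - 1)) = xs.dropLast := by
  have : ((xs.length : Int) - 1) = ((xs.length - 1 : Nat) : Int) := by omega
  rw [this, PySem.List.slice_zero_start, PySem.List.slice_to_natCast, List.dropLast_eq_take]

lemma pyGetD_pred (xs : List Int) (h : xs ≠ []) :
    PySem.List.pyGetD xs ((xs.length : Int) - 1) 0 = xs.getLast h := by
  have h1 : 0 < xs.length := List.length_pos_iff.mpr h
  rw [PySem.List.pyGetD_eq_getElem xs 0 (by omega) (by omega)]
  have h2 : ((xs.length : Int) - 1).toNat = xs.length - 1 := by omega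
  simp [h2, List.getLast_eq_getElem]

lemma a_eq_zipAdd (xs ys : List Int) : suma_polinomios xs ys = zipAdd xs ys := by
  fun_induction suma_polinomios xs ys with
  | case1 p1 p2 n_1 h1 =>
      have e1 : n_1 = (p1.length : Int) - 1 := rfl
      have hx : p1 = [] := List.eq_nil_of_length_eq_zero (by omega)
      subst hx; rfl
  | case2 p1 p2 n_1 n_2 h1 h2 =>
      have e2 : n_2 = (p2.length : Int) - 1 := rfl
      have hy : p2 = [] := List.eq_nil_of_length_eq_zero (by omega)
      subst hy; rw [zipAdd_nil_right]
  | case3 p1 p2 n_1 n_2 h1 h2 h3 ih =>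
      have e1 : n_1 = (p1.length : Int) - 1 := rfl
      have e2 : n_2 = (p2.length : Int) - 1 := rfl
      have hx : p1 ≠ [] := by
        intro hc; subst hc; simp at e1; omega
      rw [e1] at ih ⊢
      rw [ih, slice_pred p1 (by omega), pyGetD_pred p1 hx]
      conv_rhs => rw [← List.dropLast_append_getLast hx]
      rw [zipAdd_append_left _ _ _ (by simp only [List.length_dropLast]; omega)]
  | case4 p1 p2 n_1 n_2 h1 h2 h3 h4 ih =>
      have e1 : n_1 = (p1.length : Int) - 1 := rfl
      have e2 : n_2 = (p2.length : Int) - 1 := rfl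
      have hy : p2 ≠ [] := by
        intro hc; subst hc; simp at e2; omega
      rw [e2] at ih ⊢
      rw [ih, slice_pred p2 (by omega), pyGetD_pred p2 hy]
      conv_rhs => rw [← List.dropLast_append_getLast hy]
      rw [zipAdd_append_right _ _ _ (by simp only [List.length_dropLast]; omega)]
  | case5 p1 p2 n_1 n_2 h1 h2 h3 h4 ih =>
      have e1 : n_1 = (p1.length : Int) - 1 := rfl
      have e2 : n_2 = (p2.length : Int) - 1 := rfl
      have hx : p1 ≠ [] := by
        intro hc; subst hc; simp at e1; omega
      have hy : p2 ≠ [] := by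
        intro hc; subst hc; simp at e2; omega
      rw [e1, e2] at ih ⊢
      rw [ih, slice_pred p1 (by omega), slice_pred p2 (by omega),
        pyGetD_pred p1 hx, pyGetD_pred p2 hy]
      conv_rhs => rw [← List.dropLast_append_getLast hx, ← List.dropLast_append_getLast hy]
      rw [zipAdd_append_both _ _ _ _ (by simp only [List.length_dropLast]; omega)]

-- ===== VERDICT (by name: the statement is the Claim_ definition above) =====
theorem suma_polinomios_spec : Claim_equal_suma_polinomios := by
  intro p1 p2 _
  unfold Spec_suma_polinomios
  rw [a_eq_zipAdd, alt_eq_zipAdd]
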